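-- pv_equiv track=rewrite | github.com/01seok/algorithm | 프로그래머스/1/42840. 모의고사/모의고사.py | solution
-- ===== SOURCE A (Python) =====
-- def solution(answers):
--     patterns = [
--         [1,2,3,4,5],
--         [2,1,2,3,2,4,2,5],
--         [3,3,1,1,2,2,4,4,5,5]
--     ]
--
--     # 수포자들 점수
--     scores = [0, 0, 0]
--     for i, answer in enumerate(answers):
--         for j, pattern in enumerate(patterns):
--             if answer == pattern[i % len(pattern)]:
--                 scores[j] += 1
--     max_score = max(scores)
--     result = []
--     for i in range(3):
--         if scores[i] == max_score:
--             result.append(i+1)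
--
--     return result
-- ===== SOURCE B (Python) =====
-- def solution(answers):
--     patterns = [
--         [1, 2, 3, 4, 5],
--         [2, 1, 2, 3, 2, 4, 2, 5],
--         [3, 3, 1, 1, 2, 2, 4, 4, 5, 5],
--     ]
--     scores = []
--     for pat in patterns:
--         rem = []
--         n = 0
--         for a in answers:
--             if not rem:
--                 rem = list(pat)
--             p = rem.pop(0)
--             if a == p:
--                 n += 1
--         scores.append(n)
--     best = max(scores)
--     return [i + 1 for i, s in enumerate(scores) if s == best]
-- ===== Notes on version B (the rewrite author's own statement) =====
-- stated objective: alternative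
-- what changed: Replaces A's single answer-major pass with i % len indexing into all three patterns at once by three independent pattern-major passes that walk an explicitly cycled copy of each pattern (no index arithmetic), then picks the winners from enumerate(scores).
import Mathlib
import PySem

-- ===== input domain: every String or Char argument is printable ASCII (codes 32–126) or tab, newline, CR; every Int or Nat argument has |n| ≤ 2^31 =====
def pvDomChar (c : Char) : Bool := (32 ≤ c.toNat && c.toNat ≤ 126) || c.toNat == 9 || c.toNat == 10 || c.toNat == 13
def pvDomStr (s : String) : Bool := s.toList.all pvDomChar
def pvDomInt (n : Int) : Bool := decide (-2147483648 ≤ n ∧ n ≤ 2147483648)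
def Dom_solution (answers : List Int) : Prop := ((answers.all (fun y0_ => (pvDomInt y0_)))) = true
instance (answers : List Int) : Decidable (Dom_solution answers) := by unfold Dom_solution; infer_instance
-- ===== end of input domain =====

-- B replaces A's single answer-major pass with i % len indexing by three independent
-- pattern-major passes that cycle each pattern explicitly (objective: alternative).

-- ===== PORT A =====
def patA0 : List Int := [1, 2, 3, 4, 5]
def patA1 : List Int := [2, 1, 2, 3, 2, 4, 2, 5]
def patA2 : List Int := [3, 3, 1, 1, 2, 2, 4, 4, 5, 5]

-- inner 'for j, pattern in enumerate(patterns)'; pattern[i % len] is always in range, so getD is exact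
def innerA (i : Nat) (a : Int) (scores : List Int) : List Int :=
  ([(0, patA0), (1, patA1), (2, patA2)] : List (Nat × List Int)).foldl
    (fun sc jp =>
      if a = jp.2.getD (i % jp.2.length) 0 then sc.set jp.1 (sc.getD jp.1 0 + 1) else sc)
    scores

-- outer 'for i, answer in enumerate(answers)'
def loopA (i : Nat) (scores : List Int) : List Int → List Int
  | [] => scores
  | a :: as => loopA (i + 1) (innerA i a scores) as

def solution (answers : List Int) : List Int :=
  let scores := loopA 0 [0, 0, 0] answers
  let max_score := (PySem.List.max? scores (fun x => x)).getD 0   -- scores has 3 elements, max? is some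
  (PySem.List.pyRange 0 3 1).foldl
    (fun r i => if PySem.List.pyGetD scores i 0 = max_score then r ++ [i + 1] else r) []

-- ===== PORT B =====
-- one pattern-major pass: cycle 'pat' against the answers, counting matches
def countCycle (pat : List Int) : List Int → List Int → Int
  | _, [] => 0
  | rem, a :: as =>
    let rem' := if rem.isEmpty then pat else rem
    match rem' with
    | [] => 0   -- unreachable: the three patterns are nonempty
    | p :: r => (if a = p then 1 else 0) + countCycle pat r as

def solution_alt (answers : List Int) : List Int :=
  let patterns : List (List Int) :=
    [[1, 2, 3, 4, 5], [2, 1, 2, 3, 2, 4, 2, 5], [3, 3, 1, 1, 2, 2, 4, 4, 5, 5]]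
  let scores := patterns.map (fun pat => countCycle pat [] answers)
  let best := (PySem.List.max? scores (fun x => x)).getD 0
  (PySem.List.enumerate scores 0).filterMap
    (fun p => if p.2 = best then some (p.1 + 1) else none)

-- ===== PRECONDITION & SPEC =====
def Spec_solution (answers : List Int) (out : List Int) : Prop := out = solution_alt answers
instance (answers : List Int) (out : List Int) : Decidable (Spec_solution answers out) := by unfold Spec_solution; infer_instance

-- ===== CLAIM (what is proved, stated in full; the proofs are below) =====
def Claim_equal_solution : Prop := ∀ (answers : List Int), Dom_solution answers → Spec_solution answers (solution answers)

-- ===== LEMMAS AND PROOFS =====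

-- refilling an exhausted pattern equals starting from the full pattern
lemma countCycle_nil_eq (pat : List Int) (as : List Int) :
    countCycle pat [] as = countCycle pat pat as := by
  cases as with
  | nil => rfl
  | cons a as => cases pat <;> simp [countCycle]

-- one step of the cycle, phrased via the drop of the pattern at i % len
lemma countCycle_step (p : Int) (pt : List Int) (i : Nat) (a : Int) (as : List Int) :
    countCycle (p :: pt) ((p :: pt).drop (i % (pt.length + 1))) (a :: as)
      = (if a = (p :: pt).getD (i % (pt.length + 1)) 0 then 1 else 0)
        + countCycle (p :: pt) ((p :: pt).drop ((i + 1) % (pt.length + 1))) as := by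
  set L := pt.length + 1 with hL
  have hlt : i % L < L := Nat.mod_lt _ (by omega)
  have hlen : (p :: pt).length = L := by simp [hL]
  have hmod : (i + 1) % L = (i % L + 1) % L := (Nat.mod_add_mod i L 1).symm
  rw [List.drop_eq_getElem_cons (by omega), List.getD_eq_getElem _ _ (by omega)]
  simp only [countCycle, List.isEmpty_cons, Bool.false_eq_true, if_false]
  congr 1
  by_cases h : i % L + 1 = L
  · have h1 : (p :: pt).drop (i % L + 1) = [] := List.drop_eq_nil_of_le (by omega)
    have h2 : (i + 1) % L = 0 := by rw [hmod, h, Nat.mod_self]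
    rw [h1, h2, List.drop_zero, countCycle_nil_eq]
  · have h2 : (i + 1) % L = i % L + 1 := by rw [hmod]; exact Nat.mod_eq_of_lt (by omega)
    rw [h2]

-- A's inner loop on a length-3 score list, evaluated
lemma innerA_eval (i : Nat) (a : Int) (x y z : Int) :
    innerA i a [x, y, z]
      = [x + (if a = patA0.getD (i % 5) 0 then 1 else 0),
         y + (if a = patA1.getD (i % 8) 0 then 1 else 0),
         z + (if a = patA2.getD (i % 10) 0 then 1 else 0)] := by
  simp only [innerA, List.foldl, patA0, patA1, patA2]
  norm_num
  split_ifs <;> simp [List.set]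

-- A's whole scoring loop equals B's three cycle counts
lemma loopA_eq (answers : List Int) : ∀ (i : Nat) (x y z : Int),
    loopA i [x, y, z] answers
      = [x + countCycle patA0 (patA0.drop (i % 5)) answers,
         y + countCycle patA1 (patA1.drop (i % 8)) answers,
         z + countCycle patA2 (patA2.drop (i % 10)) answers] := by
  induction answers with
  | nil => intro i x y z; simp [loopA, countCycle]
  | cons a as ih =>
    intro i x y z
    rw [loopA, innerA_eval, ih]
    have s0 := countCycle_step 1 [2, 3, 4, 5] i a as
    have s1 := countCycle_step 2 [1, 2, 3, 2, 4, 2, 5] i a as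
    have s2 := countCycle_step 3 [3, 1, 1, 2, 2, 4, 4, 5, 5] i a as
    norm_num at s0 s1 s2
    show _ = [x + countCycle patA0 (patA0.drop (i % 5)) (a :: as),
              y + countCycle patA1 (patA1.drop (i % 8)) (a :: as),
              z + countCycle patA2 (patA2.drop (i % 10)) (a :: as)]
    rw [show patA0 = 1 :: [2, 3, 4, 5] from rfl] at *
    rw [show patA1 = 2 :: [1, 2, 3, 2, 4, 2, 5] from rfl] at *
    rw [show patA2 = 3 :: [3, 1, 1, 2, 2, 4, 4, 5, 5] from rfl] at *
    rw [s0, s1, s2]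
    simp [add_assoc]

-- the two winner-collection loops agree on any length-3 score list
lemma resultEq (s0 s1 s2 m : Int) :
    (PySem.List.pyRange 0 3 1).foldl
      (fun r i => if PySem.List.pyGetD [s0, s1, s2] i 0 = m then r ++ [i + 1] else r) []
    = (PySem.List.enumerate [s0, s1, s2] 0).filterMap
        (fun p => if p.2 = m then some (p.1 + 1) else none) := by
  have : PySem.List.pyRange 0 3 1 = [0, 1, 2] := by decide
  rw [this]
  simp only [List.foldl, PySem.List.enumerate, List.filterMap]
  norm_num [PySem.List.pyGetD, PySem.List.pyIdx?, List.getElem_cons_succ, List.getElem_cons_zero]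
  split_ifs <;> simp_all

-- ===== VERDICT (by name: the statement is the Claim_ definition above) =====
theorem solution_spec : Claim_equal_solution := by
  intro answers _
  unfold Spec_solution solution solution_alt
  have h := loopA_eq answers 0 0 0 0
  norm_num at h
  rw [h]
  simp only [List.map, patA0, patA1, patA2]
  simp only [← countCycle_nil_eq]
  exact resultEq _ _ _ _
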